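-- pv_equiv track=rewrite | github.com/domysh/high-school-projects | Python/CodiceFiscaleGenerator/GeneratorFiscalCode.py | CalculateSurename
-- ===== SOURCE A (Python) =====
-- def IsAVocale(lett):
-- 	lett = lett.upper()
-- 	return (lett == 'A' or lett == 'E' or lett == 'I' or lett=='O' or lett=='U')
--
-- def ReturnSeparateLetters(text):
-- 	resV = resC = ""
-- 	for let in text:
-- 		if IsAVocale(let):
-- 			resV+=let
-- 		else:
-- 			resC+=let
-- 	return [resV,resC]
--
-- def CalculateSurename(surename):
-- 	res = ""
-- 	voc,cons = ReturnSeparateLetters(surename)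
-- 	if len(surename)<3:
-- 		res = cons+voc
-- 		for i in range(1,4-len(surename)):
-- 			res+="X"
-- 	elif len(cons)<3:
-- 		res = cons
-- 		for let in voc:
-- 			res+=let
-- 			if len(res) == 3:
-- 				break
-- 	else:
-- 		for i in range(0,3):
-- 			res += cons[i]
-- 	return res
-- ===== SOURCE B (Python) =====
-- def CalculateSurename(surename):
--     cons = ""
--     vowels = ""
--     for ch in surename:
--         if ch.upper() in "AEIOU":
--             vowels += ch
--         else:
--             cons += ch
--     return (cons + vowels + "XXX")[:3]
-- ===== Notes on version B (the rewrite author's own statement) =====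
-- stated objective: simpler
-- what changed: B replaces A's three-way branch with two padding/counting loops by a single uniform closed form: partition once, then (consonants + vowels + 'XXX')[:3].
import Mathlib
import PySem

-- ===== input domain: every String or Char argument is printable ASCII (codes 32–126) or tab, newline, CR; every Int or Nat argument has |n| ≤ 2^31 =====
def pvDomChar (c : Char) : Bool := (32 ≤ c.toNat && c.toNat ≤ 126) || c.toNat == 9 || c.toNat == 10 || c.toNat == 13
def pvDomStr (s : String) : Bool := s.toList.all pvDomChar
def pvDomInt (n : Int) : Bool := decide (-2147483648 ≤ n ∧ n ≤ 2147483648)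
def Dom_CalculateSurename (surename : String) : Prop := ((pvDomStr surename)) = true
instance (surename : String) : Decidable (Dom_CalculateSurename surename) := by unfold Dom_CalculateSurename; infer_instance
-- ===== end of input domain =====

-- B computes the same surname code by one partition pass and the closed form (cons+voc+"XXX")[:3],
-- removing A's three-way branch and its two padding/counting loops (same cost; return value only, no mutation).

-- ===== PORT A =====
-- IsAVocale: upper the one-char string, compare with the five vowels (on List Char, exact via PySem.Chars.upper)
def isAVocaleC (lett : List Char) : Bool :=
  let l := PySem.Chars.upper lett
  l == ['A'] || l == ['E'] || l == ['I'] || l == ['O'] || l == ['U']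

-- ReturnSeparateLetters: one loop accumulating (vowels, consonants)
def returnSeparateLettersC (text : List Char) : List Char × List Char :=
  text.foldl (fun acc ch =>
    if isAVocaleC [ch] then (acc.1 ++ [ch], acc.2) else (acc.1, acc.2 ++ [ch])) ([], [])

-- the 'for let in voc: res += let; if len(res) == 3: break' loop
def consLoopA : List Char → List Char → List Char
  | [], res => res
  | l :: rest, res =>
      let res := res ++ [l]
      if res.length == 3 then res else consLoopA rest res

def CalculateSurename (surename : String) : String :=
  let s := surename.toList
  let vc := returnSeparateLettersC s
  let voc := vc.1
  let cons := vc.2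
  let res : List Char :=
    if s.length < 3 then
      (PySem.List.pyRange 1 (4 - (s.length : Int)) 1).foldl (fun r _ => r ++ ['X']) (cons ++ voc)
    else if cons.length < 3 then
      consLoopA voc cons
    else
      -- cons[i] for i in range(0,3): in range here since len(cons) ≥ 3, so pyGetD is exact
      (PySem.List.pyRange 0 3 1).foldl (fun r i => r ++ [PySem.List.pyGetD cons i 'X']) []
  String.ofList res

-- ===== PORT B =====
def CalculateSurename_alt (surename : String) : String :=
  let cv := surename.toList.foldl (fun (acc : List Char × List Char) ch =>
    if PySem.Chars.isIn (PySem.Chars.upper [ch]) ['A', 'E', 'I', 'O', 'U'] then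
      (acc.1, acc.2 ++ [ch])
    else
      (acc.1 ++ [ch], acc.2)) ([], [])
  String.ofList (PySem.List.slice (cv.1 ++ cv.2 ++ ['X', 'X', 'X']) none (some 3))

-- ===== PRECONDITION & SPEC =====
def Spec_CalculateSurename (surename : String) (out : String) : Prop := out = CalculateSurename_alt surename
instance (surename : String) (out : String) : Decidable (Spec_CalculateSurename surename out) := by unfold Spec_CalculateSurename; infer_instance

-- ===== CLAIM (what is proved, stated in full; the proofs are below) =====
def Claim_equal_CalculateSurename : Prop := ∀ (surename : String), Dom_CalculateSurename surename → Spec_CalculateSurename surename (CalculateSurename surename)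

-- ===== LEMMAS AND PROOFS =====

-- the two ports' vowel tests agree on every character
lemma vowelTest_eq (c : Char) :
    PySem.Chars.isIn (PySem.Chars.upper [c]) ['A', 'E', 'I', 'O', 'U'] = isAVocaleC [c] := by
  simp only [PySem.Chars.upper, List.map, isAVocaleC]
  generalize PySem.Chars.upperChar c = u
  by_cases h : u ∈ ['A', 'E', 'I', 'O', 'U']
  · fin_cases h <;> decide
  · simp only [List.mem_cons, List.not_mem_nil, or_false] at h
    rw [not_or, not_or, not_or, not_or] at h
    obtain ⟨h1, h2, h3, h4, h5⟩ := h
    have hf : PySem.Chars.isIn [u] ['A', 'E', 'I', 'O', 'U'] = false := by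
      rw [PySem.Chars.isIn_eq_false_iff]
      intro hinf
      have : u ∈ ['A', 'E', 'I', 'O', 'U'] := hinf.sublist.subset (List.mem_singleton_self u)
      simp at this; tauto
    simp [hf, h1, h2, h3, h4, h5]

-- A's partition fold is (filter vowel, filter consonant)
lemma sepA_aux (l : List Char) (a b : List Char) :
    l.foldl (fun acc ch =>
      if isAVocaleC [ch] then (acc.1 ++ [ch], acc.2) else (acc.1, acc.2 ++ [ch])) (a, b)
    = (a ++ l.filter (fun c => isAVocaleC [c]), b ++ l.filter (fun c => !isAVocaleC [c])) := by
  induction l generalizing a b with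
  | nil => simp
  | cons x xs ih =>
      by_cases hx : isAVocaleC [x] <;> simp [hx, ih]

lemma sepA_spec (l : List Char) :
    returnSeparateLettersC l = (l.filter (fun c => isAVocaleC [c]), l.filter (fun c => !isAVocaleC [c])) := by
  simpa using sepA_aux l [] []

-- B's partition fold is the same pair, components swapped
lemma sepB_aux (l : List Char) (a b : List Char) :
    l.foldl (fun (acc : List Char × List Char) ch =>
      if PySem.Chars.isIn (PySem.Chars.upper [ch]) ['A', 'E', 'I', 'O', 'U'] then
        (acc.1, acc.2 ++ [ch])
      else
        (acc.1 ++ [ch], acc.2)) (a, b)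
    = (a ++ l.filter (fun c => !isAVocaleC [c]), b ++ l.filter (fun c => isAVocaleC [c])) := by
  induction l generalizing a b with
  | nil => simp
  | cons x xs ih =>
      rw [List.foldl_cons, vowelTest_eq]
      by_cases hx : isAVocaleC [x] <;> simp [hx, ih]

-- A's X-padding loop appends one X per iteration
lemma padLoop_spec {α : Type} (l : List α) (init : List Char) :
    l.foldl (fun r _ => r ++ ['X']) init = init ++ List.replicate l.length 'X' := by
  induction l generalizing init with
  | nil => simp
  | cons x xs ih =>
      rw [List.foldl_cons, ih, List.append_assoc, List.length_cons]
      congr 1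

-- A's break-at-3 loop is take 3 of the concatenation
lemma consLoopA_spec (l : List Char) (res : List Char) (h : res.length < 3) :
    consLoopA l res = (res ++ l).take 3 := by
  induction l generalizing res with
  | nil => simp [consLoopA, List.take_of_length_le (by omega : (res : List Char).length ≤ 3)]
  | cons x xs ih =>
      simp only [consLoopA]
      by_cases h3 : (res ++ [x]).length = 3
      · rw [if_pos (by simpa using h3)]
        rw [show res ++ x :: xs = (res ++ [x]) ++ xs by simp,
            List.take_append_of_le_length (le_of_eq h3.symm),
            List.take_of_length_le (le_of_eq h3)]
      · have hlt : (res ++ [x]).length < 3 := by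
          simp only [List.length_append, List.length_cons, List.length_nil] at h3 ⊢
          omega
        rw [if_neg (by simpa using h3), ih _ hlt]
        simp

theorem CalculateSurename_spec : Claim_equal_CalculateSurename := by
  intro s _
  unfold Spec_CalculateSurename CalculateSurename CalculateSurename_alt
  simp only [sepA_spec, sepB_aux, List.nil_append]
  set l := s.toList with hl
  set v := l.filter (fun c => isAVocaleC [c]) with hv
  set c := l.filter (fun c => !isAVocaleC [c]) with hc
  have hlen : v.length + c.length = l.length := by
    rw [hv, hc]
    exact (List.length_eq_length_filter_add (fun c => isAVocaleC [c])).symm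
  rw [PySem.List.slice_to _ (by norm_num), show Int.toNat 3 = 3 from rfl]
  congr 1
  split_ifs with h1 h2
  · -- len < 3: pad with X
    have hr : (c ++ v ++ ['X', 'X', 'X']).take 3
        = (c ++ v) ++ ['X', 'X', 'X'].take (3 - (c ++ v).length) := by
      rw [List.take_append, List.take_of_length_le (by simp; omega)]
    rw [hr, padLoop_spec, PySem.List.length_pyRange_one,
        show (['X', 'X', 'X'] : List Char) = List.replicate 3 'X' from by decide,
        List.take_replicate]
    congr 2
    simp
    omega
  · -- len ≥ 3, cons < 3: the break loop is take 3
    have hr : (c ++ v ++ ['X', 'X', 'X']).take 3 = (c ++ v).take 3 :=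
      List.take_append_of_le_length (by simp; omega)
    rw [hr, consLoopA_spec _ _ h2]
  · -- cons ≥ 3: the first three consonants
    rcases hc3 : c with _ | ⟨a, _ | ⟨b, _ | ⟨d, rest⟩⟩⟩ <;>
      rw [hc3] at h2 <;> try (simp at h2)
    rw [show PySem.List.pyRange 0 3 1 = [0, 1, 2] from by decide]
    simp [PySem.List.pyGetD_ofNat', List.take_succ_cons]
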